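-- pv_equiv track=rewrite | github.com/PhucQuan/EmailListApp | Recon_tool/redrecon/core/dirscan.py | categorize_findings
-- ===== SOURCE A (Python) =====
-- def categorize_findings(discovered):
--     """
--     Categorize discovered paths by risk level
--
--     Args:
--         discovered (list): List of discovered paths
--
--     Returns:
--         dict: Categorized findings
--     """
--     categories = {
--         "critical": [],
--         "high": [],
--         "medium": [],
--         "low": []
--     }
--
--     critical_keywords = [".env", "backup.sql", "db.sql", ".git/config", "config.php"]
--     high_keywords = ["admin", "backup", ".git", ".svn", "phpinfo"]
--     medium_keywords = ["login", "api", "upload", "test", "dev"]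
--
--     for item in discovered:
--         path = item["path"].lower()
--
--         if any(keyword in path for keyword in critical_keywords):
--             categories["critical"].append(item)
--         elif any(keyword in path for keyword in high_keywords):
--             categories["high"].append(item)
--         elif any(keyword in path for keyword in medium_keywords):
--             categories["medium"].append(item)
--         else:
--             categories["low"].append(item)
--
--     return categories
-- ===== SOURCE B (Python) =====
-- def categorize_findings(discovered):
--     """Categorize discovered paths by risk level via staged partition passes:
--     each level filters its matches out of the remaining items, leftovers are low."""
--     def matches(item, keywords):
--         path = item["path"].lower()
--         return any(k in path for k in keywords)
--
--     categories = {}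
--     remaining = list(discovered)
--     for name, keywords in [
--         ("critical", [".env", "backup.sql", "db.sql", ".git/config", "config.php"]),
--         ("high", ["admin", "backup", ".git", ".svn", "phpinfo"]),
--         ("medium", ["login", "api", "upload", "test", "dev"]),
--     ]:
--         categories[name] = [it for it in remaining if matches(it, keywords)]
--         remaining = [it for it in remaining if not matches(it, keywords)]
--     categories["low"] = remaining
--     return categories
-- ===== Notes on version B (the rewrite author's own statement) =====
-- stated objective: alternative
-- what changed: Replaces A's single pass with a per-item if/elif dispatch into pre-seeded buckets by staged whole-list partition passes: each risk level filters its matches out of the remaining list and the final remainder becomes 'low'.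
-- outside the precondition, e.g. on categorize_findings([{}]): A raises KeyError, B raises KeyError
import Mathlib
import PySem

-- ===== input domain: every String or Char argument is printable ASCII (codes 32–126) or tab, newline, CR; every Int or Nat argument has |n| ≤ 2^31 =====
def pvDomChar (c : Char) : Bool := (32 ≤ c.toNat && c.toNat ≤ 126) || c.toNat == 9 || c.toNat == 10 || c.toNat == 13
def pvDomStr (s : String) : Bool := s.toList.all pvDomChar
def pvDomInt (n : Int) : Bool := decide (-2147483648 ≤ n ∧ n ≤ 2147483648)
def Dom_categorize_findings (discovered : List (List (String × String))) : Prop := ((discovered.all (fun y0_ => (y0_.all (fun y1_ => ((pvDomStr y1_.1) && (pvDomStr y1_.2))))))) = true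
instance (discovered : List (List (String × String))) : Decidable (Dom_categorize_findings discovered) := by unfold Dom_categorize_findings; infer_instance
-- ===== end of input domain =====

-- B replaces A's single pass (per-item if/elif dispatch into pre-seeded buckets) by staged
-- whole-list partition passes: each level filters its matches out of the remaining list,
-- the final remainder is 'low'; objective: alternative (same cost, different traversal).

-- shared helper: item["path"] on an association-list dict = first match (KeyError → none; excluded by Pre_)
def pvPathOf (item : List (String × String)) : Option String :=
  (item.find? (fun p => p.1 == "path")).map (·.2)

-- ===== PORT A =====
def pvCritical : List String := [".env", "backup.sql", "db.sql", ".git/config", "config.php"]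
def pvHigh : List String := ["admin", "backup", ".git", ".svn", "phpinfo"]
def pvMedium : List String := ["login", "api", "upload", "test", "dev"]

def pvInit : PySem.Dict String (List (List (String × String))) :=
  ((((PySem.Dict.empty.insert "critical" []).insert "high" []).insert "medium" []).insert "low" [])

-- one iteration of A's loop (the .getD "" is unreachable inside Pre_, where "path" is present)
def pvStepA (categories : PySem.Dict String (List (List (String × String))))
    (item : List (String × String)) : PySem.Dict String (List (List (String × String))) :=
  let path := PySem.Str.lower ((pvPathOf item).getD "")
  if pvCritical.any (fun kw => PySem.Str.isIn kw path) then
    categories.modify "critical" [] (· ++ [item])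
  else if pvHigh.any (fun kw => PySem.Str.isIn kw path) then
    categories.modify "high" [] (· ++ [item])
  else if pvMedium.any (fun kw => PySem.Str.isIn kw path) then
    categories.modify "medium" [] (· ++ [item])
  else
    categories.modify "low" [] (· ++ [item])

def categorize_findings (discovered : List (List (String × String))) : List (String × List (List (String × String))) :=
  (discovered.foldl pvStepA pvInit).items

-- ===== PORT B =====
-- Source B's helper: matches(item, keywords)
def pvMatches (item : List (String × String)) (keywords : List String) : Bool :=
  let path := PySem.Str.lower ((pvPathOf item).getD "")
  keywords.any (fun k => PySem.Str.isIn k path)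

def pvLEVELS : List (String × List String) :=
  [("critical", [".env", "backup.sql", "db.sql", ".git/config", "config.php"]),
   ("high", ["admin", "backup", ".git", ".svn", "phpinfo"]),
   ("medium", ["login", "api", "upload", "test", "dev"])]

-- Source B's staged partition loop: state = (categories dict, remaining items)
def categorize_findings_alt (discovered : List (List (String × String))) : List (String × List (List (String × String))) :=
  let st := pvLEVELS.foldl
    (fun st lvl =>
      (st.1.insert lvl.1 (st.2.filter (fun it => pvMatches it lvl.2)),
       st.2.filter (fun it => !pvMatches it lvl.2)))
    (PySem.Dict.empty, discovered)
  (st.1.insert "low" st.2).items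

-- ===== PRECONDITION & SPEC =====
-- Pre_ excludes exactly the items without a "path" key, on which A raises KeyError (B too).
def Pre_categorize_findings (discovered : List (List (String × String))) : Prop :=
  (discovered.all (fun item => item.any (fun p => p.1 == "path"))) = true
instance (discovered : List (List (String × String))) : Decidable (Pre_categorize_findings discovered) := by unfold Pre_categorize_findings; infer_instance
def pvWitness_categorize_findings : (List (List (String × String))) := [[("path", "/admin/login")]]

def Spec_categorize_findings (discovered : List (List (String × String))) (out : List (String × List (List (String × String)))) : Prop := out = categorize_findings_alt discovered
instance (discovered : List (List (String × String))) (out : List (String × List (List (String × String)))) : Decidable (Spec_categorize_findings discovered out) := by unfold Spec_categorize_findings; infer_instance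

-- ===== CLAIM (what is proved, stated in full; the proofs are below) =====
def Claim_equal_categorize_findings : Prop := ∀ (discovered : List (List (String × String))), Dom_categorize_findings discovered → Pre_categorize_findings discovered → Spec_categorize_findings discovered (categorize_findings discovered)

-- ===== LEMMAS AND PROOFS =====

-- the four disjoint bucket predicates (first-match priority made explicit)
def pvPC (it : List (String × String)) : Bool := pvMatches it pvCritical
def pvPH (it : List (String × String)) : Bool := !pvMatches it pvCritical && pvMatches it pvHigh
def pvPM (it : List (String × String)) : Bool :=
  !pvMatches it pvCritical && !pvMatches it pvHigh && pvMatches it pvMedium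
def pvPL (it : List (String × String)) : Bool :=
  !pvMatches it pvCritical && !pvMatches it pvHigh && !pvMatches it pvMedium

-- a literal four-bucket dict
def pvMkD (c h m l : List (List (String × String))) : PySem.Dict String (List (List (String × String))) :=
  ((((PySem.Dict.empty.insert "critical" c).insert "high" h).insert "medium" m).insert "low" l)

theorem pvModCrit (c h m l : List (List (String × String))) (x : List (String × String)) :
    (pvMkD c h m l).modify "critical" [] (· ++ [x]) = pvMkD (c ++ [x]) h m l := by
  simp [pvMkD, PySem.Dict.modify, PySem.Dict.insert, PySem.Dict.empty, PySem.Dict.getD, PySem.Dict.get?]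

theorem pvModHigh (c h m l : List (List (String × String))) (x : List (String × String)) :
    (pvMkD c h m l).modify "high" [] (· ++ [x]) = pvMkD c (h ++ [x]) m l := by
  simp [pvMkD, PySem.Dict.modify, PySem.Dict.insert, PySem.Dict.empty, PySem.Dict.getD, PySem.Dict.get?]

theorem pvModMed (c h m l : List (List (String × String))) (x : List (String × String)) :
    (pvMkD c h m l).modify "medium" [] (· ++ [x]) = pvMkD c h (m ++ [x]) l := by
  simp [pvMkD, PySem.Dict.modify, PySem.Dict.insert, PySem.Dict.empty, PySem.Dict.getD, PySem.Dict.get?]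

theorem pvModLow (c h m l : List (List (String × String))) (x : List (String × String)) :
    (pvMkD c h m l).modify "low" [] (· ++ [x]) = pvMkD c h m (l ++ [x]) := by
  simp [pvMkD, PySem.Dict.modify, PySem.Dict.insert, PySem.Dict.empty, PySem.Dict.getD, PySem.Dict.get?]

-- one step of A's loop on a literal four-bucket dict
theorem pvStepA_mkD (c h m l : List (List (String × String))) (x : List (String × String)) :
    pvStepA (pvMkD c h m l) x =
      if pvMatches x pvCritical then pvMkD (c ++ [x]) h m l
      else if pvMatches x pvHigh then pvMkD c (h ++ [x]) m l
      else if pvMatches x pvMedium then pvMkD c h (m ++ [x]) l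
      else pvMkD c h m (l ++ [x]) := by
  show (if pvMatches x pvCritical then (pvMkD c h m l).modify "critical" [] (· ++ [x])
        else if pvMatches x pvHigh then (pvMkD c h m l).modify "high" [] (· ++ [x])
        else if pvMatches x pvMedium then (pvMkD c h m l).modify "medium" [] (· ++ [x])
        else (pvMkD c h m l).modify "low" [] (· ++ [x])) = _
  split_ifs with h1 h2 h3
  · exact pvModCrit c h m l x
  · exact pvModHigh c h m l x
  · exact pvModMed c h m l x
  · exact pvModLow c h m l x

-- A's single pass characterised: starting from any bucket contents it appends the four filters
theorem pvFoldA (xs : List (List (String × String))) :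
    ∀ c h m l, xs.foldl pvStepA (pvMkD c h m l)
      = pvMkD (c ++ xs.filter pvPC) (h ++ xs.filter pvPH) (m ++ xs.filter pvPM) (l ++ xs.filter pvPL) := by
  induction xs with
  | nil => intro c h m l; simp
  | cons x xs ih =>
    intro c h m l
    rw [List.foldl_cons, pvStepA_mkD]
    by_cases b1 : pvMatches x pvCritical
    · rw [if_pos b1, ih]
      simp [pvPC, pvPH, pvPM, pvPL, b1]
    · by_cases b2 : pvMatches x pvHigh
      · rw [if_neg b1, if_pos b2, ih]
        simp [pvPC, pvPH, pvPM, pvPL, b1, b2]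
      · by_cases b3 : pvMatches x pvMedium
        · rw [if_neg b1, if_neg b2, if_pos b3, ih]
          simp [pvPC, pvPH, pvPM, pvPL, b1, b2, b3]
        · rw [if_neg b1, if_neg b2, if_neg b3, ih]
          simp [pvPC, pvPH, pvPM, pvPL, b1, b2, b3]

-- composing two filters into one conjunction
theorem pvFilterFilter (p q : List (String × String) → Bool) (ys : List (List (String × String))) :
    List.filter q (List.filter p ys) = ys.filter (fun it => p it && q it) := by
  induction ys with
  | nil => rfl
  | cons y ys ih =>
    by_cases hp : p y
    · by_cases hq : q y <;> simp [hp, hq, ih]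
    · simp [hp, ih]

-- B's staged passes characterised: they compute the same four filters
theorem pvAltEq (xs : List (List (String × String))) :
    categorize_findings_alt xs
      = (pvMkD (xs.filter pvPC) (xs.filter pvPH) (xs.filter pvPM) (xs.filter pvPL)).items := by
  simp only [categorize_findings_alt, pvLEVELS, List.foldl_cons, List.foldl_nil, pvFilterFilter]
  have e2 : xs.filter (fun it => !pvMatches it pvCritical && pvMatches it pvHigh) = xs.filter pvPH := rfl
  have e3 : xs.filter (fun it => (!pvMatches it pvCritical && !pvMatches it pvHigh) && pvMatches it pvMedium)
      = xs.filter pvPM := List.filter_congr (fun it _ => by simp [pvPM, Bool.and_assoc])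
  have e4 : xs.filter (fun it => (!pvMatches it pvCritical && !pvMatches it pvHigh) && !pvMatches it pvMedium)
      = xs.filter pvPL := List.filter_congr (fun it _ => by simp [pvPL, Bool.and_assoc])
  simp only [pvCritical, pvHigh, pvMedium] at e2 e3 e4
  rw [e2, e3, e4]
  rfl

-- ===== VERDICT (by name: the statement is the Claim_ definition above) =====
theorem categorize_findings_spec : Claim_equal_categorize_findings := by
  intro discovered _ _
  unfold Spec_categorize_findings
  have hinit : pvInit = pvMkD [] [] [] [] := rfl
  unfold categorize_findings
  rw [hinit, pvFoldA, pvAltEq]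
  simp
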